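-- pv_equiv track=rewrite | github.com/kazuhiko1979/edabit | The Snake — Area Filling.py | snakefill
-- ===== SOURCE A (Python) =====
-- def snakefill(n):
--
--     snake = 1
--     snake_list = []
--
--     while snake <= n**2:
--         snake = snake * 2
--         snake_list.append(snake)
--
--         if snake > n**2:
--             break
--     snake_list.insert(0, 1)
--
--     return len(snake_list) - 2
-- ===== SOURCE B (Python) =====
-- def snakefill(n):
--     # Closed form: the loop counts the smallest i with 2**i > n*n and returns i-1,
--     # which is exactly bit_length(n*n) - 1.
--     return (n * n).bit_length() - 1
-- ===== Notes on version B (the rewrite author's own statement) =====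
-- stated objective: simpler
-- what changed: Replaces the doubling while-loop and the accumulated list with the one-line closed form (n*n).bit_length() - 1.
import Mathlib
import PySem

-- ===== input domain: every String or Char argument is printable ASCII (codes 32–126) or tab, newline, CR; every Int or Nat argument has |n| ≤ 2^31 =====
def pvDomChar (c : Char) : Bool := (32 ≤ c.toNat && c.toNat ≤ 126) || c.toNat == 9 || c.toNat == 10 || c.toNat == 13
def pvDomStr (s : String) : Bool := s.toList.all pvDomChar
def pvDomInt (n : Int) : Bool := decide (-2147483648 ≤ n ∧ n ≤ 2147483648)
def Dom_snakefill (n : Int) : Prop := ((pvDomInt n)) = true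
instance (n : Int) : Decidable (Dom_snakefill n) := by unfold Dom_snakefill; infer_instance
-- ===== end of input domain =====

-- B replaces A's doubling while-loop and accumulated list with the closed form
-- (n*n).bit_length() - 1 (objective: simpler).

-- ===== PORT A =====
-- A's while-loop: double `snake`, append it to `lst`, break once snake > m (= n**2).
-- The positivity argument `hs` only justifies termination; snake starts at 1.
def snakeLoop (m snake : Int) (hs : 0 < snake) (lst : List Int) : List Int :=
  if _h : snake ≤ m then
    if snake * 2 > m then lst ++ [snake * 2]
    else snakeLoop m (snake * 2) (by omega) (lst ++ [snake * 2])
  else lst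
termination_by (m - snake + 1).toNat
decreasing_by omega

def snakefill (n : Int) : Int :=
  let snake_list := snakeLoop (n ^ 2) 1 (by omega) []
  let snake_list := (1 : Int) :: snake_list   -- snake_list.insert(0, 1)
  (snake_list.length : Int) - 2

-- ===== PORT B =====
-- Python's (n*n).bit_length() for the nonnegative n*n is Nat.size.
def snakefill_alt (n : Int) : Int := ((n * n).toNat.size : Int) - 1

-- ===== PRECONDITION & SPEC =====
def Spec_snakefill (n : Int) (out : Int) : Prop := out = snakefill_alt n
instance (n : Int) (out : Int) : Decidable (Spec_snakefill n out) := by unfold Spec_snakefill; infer_instance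

-- ===== CLAIM (what is proved, stated in full; the proofs are below) =====
def Claim_equal_snakefill : Prop := ∀ (n : Int), Dom_snakefill n → Spec_snakefill n (snakefill n)

-- ===== LEMMAS AND PROOFS =====

-- iteration count of A's while-loop (same recursion shape as snakeLoop)
def itcount (m snake : Int) (hs : 0 < snake) : Nat :=
  if _h : snake ≤ m then
    (if snake * 2 > m then 0 else itcount m (snake * 2) (by omega)) + 1
  else 0
termination_by (m - snake + 1).toNat
decreasing_by omega

theorem snakeLoop_length (m snake : Int) (hs : 0 < snake) (lst : List Int) :
    (snakeLoop m snake hs lst).length = lst.length + itcount m snake hs := by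
  fun_induction snakeLoop m snake hs lst with
  | case1 => rename_i h hbr; rw [itcount]; simp [h, hbr]
  | case2 => rename_i h hbr ih; rw [itcount]; simp [h, hbr, ih]; omega
  | case3 => rename_i h; rw [itcount]; simp [h]

theorem size_div2_succ (q : Nat) (hq : 0 < q) : Nat.size q = Nat.size (q / 2) + 1 := by
  apply le_antisymm
  · apply Nat.size_le.mpr
    have h1 : q / 2 < 2 ^ Nat.size (q / 2) := Nat.lt_size_self _
    rw [pow_succ]; omega
  · have : Nat.size (q / 2) < Nat.size q := by
      apply Nat.lt_size.mpr
      rcases Nat.eq_zero_or_pos (q / 2) with h0 | hpos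
      · simpa [h0] using hq
      · have hs1 : 1 ≤ Nat.size (q / 2) := Nat.size_pos.mpr hpos
        have h2 : 2 ^ (Nat.size (q / 2) - 1) ≤ q / 2 := Nat.lt_size.mp (by omega)
        calc 2 ^ Nat.size (q / 2) = 2 ^ (Nat.size (q / 2) - 1 + 1) := by congr 1; omega
          _ = 2 * 2 ^ (Nat.size (q / 2) - 1) := by rw [pow_succ]; ring
          _ ≤ 2 * (q / 2) := by omega
          _ ≤ q := by omega
    omega

theorem itcount_eq_size (m snake : Int) (hs : 0 < snake) (hm : 0 ≤ m) :
    itcount m snake hs = (m.toNat / snake.toNat).size := by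
  fun_induction itcount m snake hs with
  | case1 =>
      rename_i snake hs h ih
      by_cases hbr : snake * 2 > m
      · have ha : 1 ≤ m.toNat / snake.toNat := (Nat.one_le_div_iff (by omega)).mpr (by omega)
        have hb : m.toNat / snake.toNat < 2 := Nat.div_lt_of_lt_mul (by omega)
        have hq : m.toNat / snake.toNat = 1 := by omega
        rw [if_pos hbr, hq, Nat.size_one]
      · have hqpos : 0 < m.toNat / snake.toNat := Nat.div_pos (by omega) (by omega)
        rw [if_neg hbr, ih hbr, show (snake * 2).toNat = snake.toNat * 2 by omega,
          ← Nat.div_div_eq_div_mul]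
        exact (size_div2_succ _ hqpos).symm
  | case2 =>
      rename_i snake hs h
      have hq : m.toNat / snake.toNat = 0 := Nat.div_eq_of_lt (by omega)
      simp [hq]

-- ===== VERDICT (by name: the statement is the Claim_ definition above) =====
theorem snakefill_spec : Claim_equal_snakefill := by
  intro n _
  unfold Spec_snakefill snakefill snakefill_alt
  show ((((1 : Int) :: snakeLoop (n ^ 2) 1 (by omega) []).length : Int)) - 2
      = ((n * n).toNat.size : Int) - 1
  rw [List.length_cons, snakeLoop_length, itcount_eq_size _ _ _ (sq_nonneg n)]
  have h1 : (n ^ 2).toNat / (1 : Int).toNat = (n * n).toNat := by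
    rw [pow_two]; simp
  rw [h1, List.length_nil]; push_cast; omega
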